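-- pv_equiv track=rewrite | github.com/diegomrodrigues2/algo_ds_challenges | algorithms/backtracking/obst_backtracking.py | obst_backtracking_count_structures
-- ===== SOURCE A (Python) =====
-- from typing import List, Optional, Tuple, Dict
--
-- def obst_backtracking_count_structures(keys: List[int], freq: List[int]) -> Tuple[int, int]:
--     """
--     Count the number of optimal binary search tree structures.
--
--     Args:
--         keys: Sorted array of search keys
--         freq: Frequency counts for each key
--
--     Returns:
--         Tuple of (minimum cost, number of optimal structures)
--
--     Time Complexity: O(n³)
--     Space Complexity: O(n²)
--     """
--     if not keys or not freq or len(keys) != len(freq):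
--         return (0, 0)
--
--     memo: Dict[Tuple[int, int], int] = {}
--     count_memo: Dict[Tuple[int, int], int] = {}
--
--     def sum_freq(i: int, j: int) -> int:
--         """Calculate sum of frequencies from index i to j."""
--         return sum(freq[i:j+1])
--
--     def opt_cost(i: int, j: int) -> int:
--         if i > j:
--             return 0
--         if i == j:
--             return freq[i]
--
--         state = (i, j)
--         if state in memo:
--             return memo[state]
--
--         # Get sum of frequencies for this range
--         fsum = sum_freq(i, j)
--
--         # Try each key as root and find minimum cost
--         min_cost = float('inf')
--         for r in range(i, j + 1):
--             cost = opt_cost(i, r - 1) + opt_cost(r + 1, j)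
--             if cost < min_cost:
--                 min_cost = cost
--
--         memo[state] = min_cost + fsum
--         return memo[state]
--
--     def count_structures(i: int, j: int) -> int:
--         """Count number of optimal structures for range [i, j]."""
--         if i > j:
--             return 1  # One way to represent empty subtree
--         if i == j:
--             return 1  # One way to represent single node
--
--         state = (i, j)
--         if state in count_memo:
--             return count_memo[state]
--
--         # Get optimal cost for this range
--         optimal_cost = opt_cost(i, j)
--         fsum = sum_freq(i, j)
--
--         # Count all roots that give the optimal cost
--         count = 0
--         for r in range(i, j + 1):
--             cost = opt_cost(i, r - 1) + opt_cost(r + 1, j)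
--             if cost + fsum == optimal_cost:
--                 # This root gives optimal cost
--                 left_count = count_structures(i, r - 1)
--                 right_count = count_structures(r + 1, j)
--                 count += left_count * right_count
--
--         count_memo[state] = count
--         return count
--
--     min_cost = opt_cost(0, len(keys) - 1)
--     structure_count = count_structures(0, len(keys) - 1)
--
--     return (min_cost, structure_count)
-- ===== SOURCE B (Python) =====
-- from typing import List, Tuple
--
-- def obst_backtracking_count_structures(keys: List[int], freq: List[int]) -> Tuple[int, int]:
--     """Prefix sums + a single memoized recursion returning (cost, count) per
--     interval in one pass over the roots (min and count tracked together)."""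
--     if not keys or not freq or len(keys) != len(freq):
--         return (0, 0)
--     n = len(freq)
--     pre = [0] * (n + 1)
--     for k in range(n):
--         pre[k + 1] = pre[k] + freq[k]
--     memo = {}
--
--     def solve(i, j):
--         if i > j:
--             return (0, 1)
--         if (i, j) in memo:
--             return memo[(i, j)]
--         best = None
--         cnt = 0
--         for r in range(i, j + 1):
--             lc, lk = solve(i, r - 1)
--             rc, rk = solve(r + 1, j)
--             c = lc + rc
--             if best is None or c < best:
--                 best, cnt = c, lk * rk
--             elif c == best:
--                 cnt += lk * rk
--         res = (best + pre[j + 1] - pre[i], cnt)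
--         memo[(i, j)] = res
--         return res
--
--     return solve(0, n - 1)
-- ===== Notes on version B (the rewrite author's own statement) =====
-- stated objective: alternative
-- what changed: Replaced A's two separate memoized recursions (a min-cost pass plus a second root scan that recomputes costs to count optima, with O(n) range sums) by a prefix-sum array and a single recursion per interval that returns the (cost, count) pair, tracking the minimum and the count of optimal roots together in one pass.
import Mathlib
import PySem

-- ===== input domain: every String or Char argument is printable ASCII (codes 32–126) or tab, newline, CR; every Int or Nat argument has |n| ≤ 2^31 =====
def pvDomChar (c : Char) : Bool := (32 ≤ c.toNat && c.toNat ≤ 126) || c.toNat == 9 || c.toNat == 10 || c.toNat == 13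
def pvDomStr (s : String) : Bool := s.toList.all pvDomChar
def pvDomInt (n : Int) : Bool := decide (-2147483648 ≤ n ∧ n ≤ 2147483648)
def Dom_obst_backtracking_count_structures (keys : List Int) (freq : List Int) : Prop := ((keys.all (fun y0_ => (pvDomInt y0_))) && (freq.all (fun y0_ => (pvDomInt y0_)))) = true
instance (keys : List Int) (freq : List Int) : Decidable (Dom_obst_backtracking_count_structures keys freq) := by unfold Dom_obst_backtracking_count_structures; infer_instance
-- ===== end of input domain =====

-- B replaces A's two separate memoized recursions (min-cost pass plus a root re-scan
-- for counting) by prefix sums and ONE recursion per interval returning the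
-- (cost, count) pair, tracking minimum and count together in a single pass over roots.
-- (A's Python memo dicts are a pure cache; both ports are the memo-free recursions,
-- written with a fuel argument that is always sufficient at the top-level call.)

-- ===== PORT A =====
-- sum(freq[i:j+1])
def aSumFreq (freq : List Int) (i j : Int) : Int :=
  (PySem.List.slice freq (some i) (some (j + 1))).sum

-- opt_cost(i, j); float('inf') is ported as `none` in an Option Int accumulator
-- (the loop is non-empty whenever it runs, so the Option is always `some` at the end);
-- freq[i] is ported total as pyGetD (every reachable access is in range).
def aOptCost (freq : List Int) : Nat → Int → Int → Int
  | 0, _, _ => 0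
  | fuel+1, i, j =>
    if i > j then 0
    else if i = j then PySem.List.pyGetD freq i 0
    else
      let fsum := aSumFreq freq i j
      let mc := (PySem.List.pyRange i (j + 1) 1).foldl
        (fun m r =>
          let c := aOptCost freq fuel i (r - 1) + aOptCost freq fuel (r + 1) j
          match m with
          | none => some c
          | some m' => if c < m' then some c else some m') none
      mc.getD 0 + fsum

-- count_structures(i, j)
def aCountStructs (freq : List Int) : Nat → Int → Int → Int
  | 0, _, _ => 1
  | fuel+1, i, j =>
    if i > j then 1
    else if i = j then 1
    else
      let optc := aOptCost freq (fuel+1) i j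
      let fsum := aSumFreq freq i j
      (PySem.List.pyRange i (j + 1) 1).foldl
        (fun cnt r =>
          let c := aOptCost freq fuel i (r - 1) + aOptCost freq fuel (r + 1) j
          if c + fsum = optc then
            cnt + aCountStructs freq fuel i (r - 1) * aCountStructs freq fuel (r + 1) j
          else cnt) 0

def obst_backtracking_count_structures (keys : List Int) (freq : List Int) : Int × Int :=
  if keys = [] ∨ freq = [] ∨ keys.length ≠ freq.length then (0, 0)
  else
    (aOptCost freq keys.length 0 ((keys.length : Int) - 1),
     aCountStructs freq keys.length 0 ((keys.length : Int) - 1))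

-- ===== PORT B =====
-- the prefix-sum list pre (pre[k] = freq[0]+…+freq[k-1])
def bScan : Int → List Int → List Int
  | s, [] => [s]
  | s, x :: xs => s :: bScan (s + x) xs

-- solve(i, j): one pass over the roots maintaining (best cost so far : Option, count)
def bSolve (pre : List Int) : Nat → Int → Int → Int × Int
  | 0, _, _ => (0, 1)
  | fuel+1, i, j =>
    if i > j then (0, 1)
    else
      let st := (PySem.List.pyRange i (j + 1) 1).foldl
        (fun (bc : Option Int × Int) r =>
          let l := bSolve pre fuel i (r - 1)
          let rr := bSolve pre fuel (r + 1) j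
          let c := l.1 + rr.1
          match bc.1 with
          | none => (some c, l.2 * rr.2)
          | some b =>
            if c < b then (some c, l.2 * rr.2)
            else if c = b then (some b, bc.2 + l.2 * rr.2)
            else bc)
        (none, 0)
      (st.1.getD 0 +
        (PySem.List.pyGetD pre (j + 1) 0 - PySem.List.pyGetD pre i 0), st.2)

def obst_backtracking_count_structures_alt (keys : List Int) (freq : List Int) : Int × Int :=
  if keys = [] ∨ freq = [] ∨ keys.length ≠ freq.length then (0, 0)
  else bSolve (bScan 0 freq) keys.length 0 ((keys.length : Int) - 1)

-- ===== PRECONDITION & SPEC =====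
def Spec_obst_backtracking_count_structures (keys : List Int) (freq : List Int) (out : Int × Int) : Prop := out = obst_backtracking_count_structures_alt keys freq
instance (keys : List Int) (freq : List Int) (out : Int × Int) : Decidable (Spec_obst_backtracking_count_structures keys freq out) := by unfold Spec_obst_backtracking_count_structures; infer_instance

-- ===== CLAIM (what is proved, stated in full; the proofs are below) =====
def Claim_equal_obst_backtracking_count_structures : Prop := ∀ (keys : List Int) (freq : List Int), Dom_obst_backtracking_count_structures keys freq → Spec_obst_backtracking_count_structures keys freq (obst_backtracking_count_structures keys freq)

-- ===== LEMMAS AND PROOFS =====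

-- running minimum of c over a list, starting from m
def MinF (c : Int → Int) (rs : List Int) (m : Int) : Int :=
  rs.foldl (fun b r => if c r < b then c r else b) m

-- A's counting fold: sum of w over those r with c r = M
def CntF (c w : Int → Int) (M : Int) (rs : List Int) (s : Int) : Int :=
  rs.foldl (fun cnt r => if c r = M then cnt + w r else cnt) s

-- A's option-valued running-minimum step (none = float('inf'))
def pvMinStep (c : Int → Int) (mo : Option Int) (r : Int) : Option Int :=
  match mo with
  | none => some (c r)
  | some m' => if c r < m' then some (c r) else some m'

-- B's one-pass (min, count) step
def pvStep (c w : Int → Int) (bc : Option Int × Int) (r : Int) : Option Int × Int :=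
  match bc.1 with
  | none => (some (c r), w r)
  | some b =>
    if c r < b then (some (c r), w r)
    else if c r = b then (some b, bc.2 + w r)
    else bc

lemma MinF_nil (c : Int → Int) (m : Int) : MinF c [] m = m := rfl

lemma MinF_cons (c : Int → Int) (r : Int) (rs : List Int) (m : Int) :
    MinF c (r :: rs) m = MinF c rs (if c r < m then c r else m) := rfl

lemma CntF_nil (c w : Int → Int) (M s : Int) : CntF c w M [] s = s := rfl

lemma CntF_cons (c w : Int → Int) (M : Int) (r : Int) (rs : List Int) (s : Int) :
    CntF c w M (r :: rs) s = CntF c w M rs (if c r = M then s + w r else s) := rfl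

lemma MinF_le (c : Int → Int) : ∀ (rs : List Int) (m : Int), MinF c rs m ≤ m := by
  intro rs
  induction rs with
  | nil => intro m; simp [MinF_nil]
  | cons r rs ih =>
    intro m
    rw [MinF_cons]
    have h := ih (if c r < m then c r else m)
    split_ifs at h ⊢ <;> omega

lemma CntF_acc (c w : Int → Int) (M : Int) : ∀ (rs : List Int) (s : Int),
    CntF c w M rs s = s + CntF c w M rs 0 := by
  intro rs
  induction rs with
  | nil => intro s; simp [CntF_nil]
  | cons r rs ih =>
    intro s
    rw [CntF_cons, CntF_cons]
    split_ifs
    · rw [ih (s + w r), ih (0 + w r)]; ring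
    · exact ih s

-- A's min fold with an Option accumulator, started at `some m`
lemma aMinFold_some (c : Int → Int) : ∀ (rs : List Int) (m : Int),
    rs.foldl (pvMinStep c) (some m) = some (MinF c rs m) := by
  intro rs
  induction rs with
  | nil => intro m; simp [MinF_nil]
  | cons r rs ih =>
    intro m
    rw [List.foldl_cons, MinF_cons]
    by_cases h : c r < m
    · rw [if_pos h]
      have : pvMinStep c (some m) r = some (c r) := by simp [pvMinStep, h]
      rw [this, ih]
    · rw [if_neg h]
      have : pvMinStep c (some m) r = some m := by simp [pvMinStep, h]
      rw [this, ih]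

-- the one-pass (min, weighted count) fold of B, started at (some m, cnt)
lemma onePass_fold (c w : Int → Int) : ∀ (rs : List Int) (m cnt : Int),
    rs.foldl (pvStep c w) (some m, cnt)
      = (some (MinF c rs m),
         (if MinF c rs m = m then cnt else 0) + CntF c w (MinF c rs m) rs 0) := by
  intro rs
  induction rs with
  | nil => intro m cnt; simp [MinF_nil, CntF_nil]
  | cons r rs ih =>
    intro m cnt
    rw [List.foldl_cons, MinF_cons, CntF_cons]
    rcases lt_trichotomy (c r) m with h | h | h
    · have hstep : pvStep c w (some m, cnt) r = (some (c r), w r) := by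
        simp [pvStep, h]
      have hMle := MinF_le c rs (c r)
      rw [if_pos h, hstep, ih]
      simp only [Prod.mk.injEq]
      refine ⟨trivial, ?_⟩
      rw [CntF_acc c w _ rs (if c r = MinF c rs (c r) then 0 + w r else 0)]
      split_ifs <;> omega
    · have hnl : ¬ c r < m := by omega
      have hstep : pvStep c w (some m, cnt) r = (some m, cnt + w r) := by
        simp [pvStep, h]
      have hMle := MinF_le c rs m
      rw [if_neg hnl, hstep, ih]
      simp only [Prod.mk.injEq]
      refine ⟨trivial, ?_⟩
      rw [CntF_acc c w _ rs (if c r = MinF c rs m then 0 + w r else 0)]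
      split_ifs <;> omega
    · have hnl : ¬ c r < m := by omega
      have hstep : pvStep c w (some m, cnt) r = (some m, cnt) := by
        simp [pvStep, hnl, h.ne']
      have hMle := MinF_le c rs m
      rw [if_neg hnl, hstep, ih]
      simp only [Prod.mk.injEq]
      refine ⟨trivial, ?_⟩
      rw [CntF_acc c w _ rs (if c r = MinF c rs m then 0 + w r else 0)]
      split_ifs <;> omega

-- empty-interval (and fuel-0) values of all three recursions
lemma aOptCost_empty (freq : List Int) : ∀ (fuel : Nat) (i j : Int), j < i →
    aOptCost freq fuel i j = 0 := by
  intro fuel i j h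
  cases fuel <;> simp [aOptCost, h]

lemma aCountStructs_empty (freq : List Int) : ∀ (fuel : Nat) (i j : Int), j < i →
    aCountStructs freq fuel i j = 1 := by
  intro fuel i j h
  cases fuel <;> simp [aCountStructs, h]

lemma bSolve_empty (pre : List Int) : ∀ (fuel : Nat) (i j : Int), j < i →
    bSolve pre fuel i j = (0, 1) := by
  intro fuel i j h
  cases fuel <;> simp [bSolve, h]

-- prefix list facts
lemma bScan_get : ∀ (freq : List Int) (s : Int) (k : Nat), k ≤ freq.length →
    (bScan s freq).getD k 0 = s + (freq.take k).sum := by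
  intro freq
  induction freq with
  | nil =>
    intro s k hk
    simp only [List.length_nil] at hk
    have : k = 0 := by omega
    subst this; simp [bScan]
  | cons x xs ih =>
    intro s k hk
    cases k with
    | zero => simp [bScan]
    | succ k =>
      simp only [bScan, List.getD_cons_succ, List.take_succ_cons, List.sum_cons]
      rw [ih (s + x) k (by simpa using hk)]
      ring

lemma bScan_pyGetD (freq : List Int) (i : Int) (hi : 0 ≤ i) (hle : i ≤ freq.length) :
    PySem.List.pyGetD (bScan 0 freq) i 0 = (freq.take i.toNat).sum := by
  obtain ⟨k, rfl⟩ := Int.eq_ofNat_of_zero_le hi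
  rw [PySem.List.pyGetD_natCast, bScan_get freq 0 k (by exact_mod_cast hle)]
  simp

-- sum of freq[i:j+1] as a difference of prefix sums
lemma aSumFreq_eq (freq : List Int) (i j : Int) (hi : 0 ≤ i) (hij : i ≤ j)
    (hj : j < freq.length) :
    aSumFreq freq i j = (freq.take (j + 1).toNat).sum - (freq.take i.toNat).sum := by
  unfold aSumFreq
  rw [PySem.List.slice_of_nonneg freq hi (by omega : (0:Int) ≤ j + 1)
        (by omega : i ≤ (freq.length : Int)) (by omega : j + 1 ≤ (freq.length : Int))]
  have h1 : (j + 1).toNat = i.toNat + ((j + 1).toNat - i.toNat) := by omega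
  conv_rhs => rw [h1]
  rw [List.take_add, List.sum_append]
  ring

-- ===== main equivalence on intervals =====
lemma main_equiv (freq : List Int) : ∀ (fuel : Nat) (i j : Int), 0 ≤ i → j < freq.length →
    (j + 1 - i).toNat ≤ fuel →
    aOptCost freq fuel i j = (bSolve (bScan 0 freq) fuel i j).1 ∧
    aCountStructs freq fuel i j = (bSolve (bScan 0 freq) fuel i j).2 := by
  intro fuel
  induction fuel with
  | zero =>
    intro i j _ _ hfuel
    have hij : j < i := by omega
    simp [aOptCost, aCountStructs, bSolve]
  | succ fuel ih =>
    intro i j hi hj hfuel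
    by_cases hgt : i > j
    · rw [aOptCost_empty freq _ i j hgt, aCountStructs_empty freq _ i j hgt,
          bSolve_empty _ _ i j hgt]
      exact ⟨rfl, rfl⟩
    · have hij : i ≤ j := by omega
      by_cases he : i = j
      · -- single-node interval: A returns freq[i], B's loop over the one root gives the same
        subst he
        have hA1 : aOptCost freq (fuel + 1) i i = PySem.List.pyGetD freq i 0 := by
          rw [aOptCost]
          rw [if_neg (by omega), if_pos rfl]
        have hA2 : aCountStructs freq (fuel + 1) i i = 1 := by
          rw [aCountStructs]
          rw [if_neg (by omega), if_pos rfl]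
        have hB : bSolve (bScan 0 freq) (fuel + 1) i i
            = (PySem.List.pyGetD (bScan 0 freq) (i + 1) 0
               - PySem.List.pyGetD (bScan 0 freq) i 0, 1) := by
          rw [bSolve]
          rw [if_neg (by omega), PySem.List.pyRange_one_singleton]
          simp only [List.foldl_cons, List.foldl_nil]
          rw [bSolve_empty _ fuel i (i - 1) (by omega),
              bSolve_empty _ fuel (i + 1) i (by omega)]
          simp
        have hpre1 : PySem.List.pyGetD (bScan 0 freq) (i + 1) 0
            - PySem.List.pyGetD (bScan 0 freq) i 0 = PySem.List.pyGetD freq i 0 := by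
          rw [bScan_pyGetD freq (i + 1) (by omega) (by omega),
              bScan_pyGetD freq i hi (by omega),
              PySem.List.pyGetD_eq_getElem freq 0 hi (by omega)]
          have h1 : (i + 1).toNat = i.toNat + 1 := by omega
          rw [h1, List.sum_take_succ freq i.toNat (by omega)]
          ring
        rw [hA1, hA2, hB, hpre1]
        exact ⟨rfl, rfl⟩
      have hlt : i < j := by omega
      -- the two shared value functions on roots
      set c : Int → Int := fun r =>
        aOptCost freq fuel i (r - 1) + aOptCost freq fuel (r + 1) j with hc
      set w : Int → Int := fun r =>
        aCountStructs freq fuel i (r - 1) * aCountStructs freq fuel (r + 1) j with hw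
      set rs := PySem.List.pyRange i (j + 1) 1 with hrs
      -- B's fold is the one-pass fold of (c, w)
      have hsub : ∀ r, r ∈ rs → i ≤ r ∧ r ≤ j := by
        intro r hr
        rw [hrs, PySem.List.mem_pyRange_one] at hr
        omega
      have hbpair : ∀ r, r ∈ rs →
          bSolve (bScan 0 freq) fuel i (r - 1)
            = (aOptCost freq fuel i (r - 1), aCountStructs freq fuel i (r - 1)) ∧
          bSolve (bScan 0 freq) fuel (r + 1) j
            = (aOptCost freq fuel (r + 1) j, aCountStructs freq fuel (r + 1) j) := by
        intro r hr
        obtain ⟨h1, h2⟩ := hsub r hr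
        have hL := ih i (r - 1) hi (by omega) (by omega)
        have hR := ih (r + 1) j (by omega) hj (by omega)
        refine ⟨?_, ?_⟩
        · have e1 := hL.1.symm
          have e2 := hL.2.symm
          exact Prod.ext e1 e2
        · have e1 := hR.1.symm
          have e2 := hR.2.symm
          exact Prod.ext e1 e2
      have hBfold :
          rs.foldl (fun (bc : Option Int × Int) r =>
            let l := bSolve (bScan 0 freq) fuel i (r - 1)
            let rr := bSolve (bScan 0 freq) fuel (r + 1) j
            let cc := l.1 + rr.1
            match bc.1 with
            | none => (some cc, l.2 * rr.2)
            | some b =>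
              if cc < b then (some cc, l.2 * rr.2)
              else if cc = b then (some b, bc.2 + l.2 * rr.2)
              else bc) (none, 0)
          = rs.foldl (pvStep c w) (none, 0) := by
        apply PySem.List.foldl_congr_mem
        intro acc r hr
        obtain ⟨hbl, hbr⟩ := hbpair r hr
        simp only [hbl, hbr, pvStep, hc, hw]
      -- A's min fold is the Option min fold of c
      have hAfold :
          rs.foldl (fun m r =>
            let cc := aOptCost freq fuel i (r - 1) + aOptCost freq fuel (r + 1) j
            match m with
            | none => some cc
            | some m' => if cc < m' then some cc else some m') none
          = rs.foldl (pvMinStep c) none := by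
        apply PySem.List.foldl_congr_mem
        intro acc r _
        simp only [pvMinStep, hc]
      -- split off the first root
      have hcons : rs = i :: PySem.List.pyRange (i + 1) (j + 1) 1 := by
        rw [hrs]; exact PySem.List.pyRange_one_cons (by omega)
      set rs' := PySem.List.pyRange (i + 1) (j + 1) 1 with hrs'
      set M := MinF c rs' (c i) with hM
      have hminval : rs.foldl (pvMinStep c) none = some M := by
        rw [hcons, List.foldl_cons]
        have : pvMinStep c none i = some (c i) := rfl
        rw [this, aMinFold_some]
      have honepass : rs.foldl (pvStep c w) (none, 0)
          = (some M, (if M = c i then w i else 0) + CntF c w M rs' 0) := by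
        rw [hcons, List.foldl_cons]
        have : pvStep c w (none, 0) i = (some (c i), w i) := rfl
        rw [this, onePass_fold]
      -- A's optimal cost in closed form
      have hAopt : aOptCost freq (fuel + 1) i j = M + aSumFreq freq i j := by
        rw [aOptCost]
        rw [if_neg (by omega : ¬ i > j), if_neg (by omega : ¬ i = j)]
        show ((PySem.List.pyRange i (j + 1) 1).foldl _ none).getD 0 + aSumFreq freq i j = _
        rw [← hrs, hAfold, hminval]
        rfl
      -- A's structure count in closed form
      have hAcnt : aCountStructs freq (fuel + 1) i j = CntF c w M rs 0 := by
        rw [aCountStructs]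
        rw [if_neg (by omega : ¬ i > j), if_neg (by omega : ¬ i = j)]
        show (PySem.List.pyRange i (j + 1) 1).foldl _ 0 = _
        rw [← hrs]
        unfold CntF
        apply PySem.List.foldl_congr_mem
        intro acc r _
        rw [hAopt]
        by_cases hcr : c r = M
        · have hcr2 : aOptCost freq fuel i (r - 1) + aOptCost freq fuel (r + 1) j = M := hcr
          rw [if_pos (by omega), if_pos hcr]
        · have hcr2 : ¬ aOptCost freq fuel i (r - 1) + aOptCost freq fuel (r + 1) j = M := hcr
          rw [if_neg (by omega), if_neg hcr]
      -- B in closed form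
      have hBval : bSolve (bScan 0 freq) (fuel + 1) i j
          = (M + (PySem.List.pyGetD (bScan 0 freq) (j + 1) 0
                  - PySem.List.pyGetD (bScan 0 freq) i 0),
             (if M = c i then w i else 0) + CntF c w M rs' 0) := by
        rw [bSolve]
        rw [if_neg (by omega : ¬ i > j)]
        show (((PySem.List.pyRange i (j + 1) 1).foldl _ (none, 0)).1.getD 0 + _,
              ((PySem.List.pyRange i (j + 1) 1).foldl _ (none, 0)).2) = _
        rw [← hrs, hBfold, honepass]
        simp
      -- prefix sums equal the slice sum
      have hpre : PySem.List.pyGetD (bScan 0 freq) (j + 1) 0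
            - PySem.List.pyGetD (bScan 0 freq) i 0 = aSumFreq freq i j := by
        rw [bScan_pyGetD freq (j + 1) (by omega) (by omega),
            bScan_pyGetD freq i hi (by omega),
            aSumFreq_eq freq i j hi hij hj]
      constructor
      · rw [hAopt, hBval]
        simp only
        rw [hpre]
      · rw [hAcnt, hBval]
        simp only
        rw [hcons, CntF_cons, CntF_acc c w M rs' (if c i = M then 0 + w i else 0)]
        split_ifs <;> omega

-- ===== VERDICT (by name: the statement is the Claim_ definition above) =====
theorem obst_backtracking_count_structures_spec : Claim_equal_obst_backtracking_count_structures := by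
  intro keys freq _
  unfold Spec_obst_backtracking_count_structures obst_backtracking_count_structures
    obst_backtracking_count_structures_alt
  by_cases hg : keys = [] ∨ freq = [] ∨ keys.length ≠ freq.length
  · simp [hg]
  · rw [if_neg hg, if_neg hg]
    have hk : keys ≠ [] := fun h => hg (Or.inl h)
    have hlen : keys.length = freq.length := by
      by_cases h : keys.length = freq.length
      · exact h
      · exact absurd (Or.inr (Or.inr h)) hg
    have hmain := main_equiv freq keys.length 0 ((keys.length : Int) - 1)
      le_rfl
      (by rw [← hlen]; have : 0 < keys.length := List.length_pos_iff.mpr hk; omega)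
      (by simp)
    exact Prod.ext hmain.1 hmain.2
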